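-- pv_equiv track=rewrite | github.com/dx-junkyard/plura | backend/app/services/layer1/conversation_context.py | summarize_recent_context
-- ===== SOURCE A (Python) =====
-- from typing import Dict, List, Optional, Tuple
--
-- def summarize_recent_context(
--     history: List[Tuple[str, Optional[str]]],
--     max_chars: int = 1500,
-- ) -> Optional[str]:
--     """
--     直近の会話履歴から要約テキストを生成する。
--     短い発話時に LLM が文脈を把握するための補助。
--     """
--     if not history:
--         return None
--
--     parts: List[str] = []
--     total = 0
--     for user_content, assistant_reply in reversed(history):
--         snippet = user_content.strip()
--         if len(snippet) > 400:
--             snippet = snippet[:400] + "…（省略）"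
--         entry = f"- ユーザー: {snippet}"
--         if assistant_reply:
--             reply_snippet = assistant_reply.strip()
--             if len(reply_snippet) > 200:
--                 reply_snippet = reply_snippet[:200] + "…"
--             entry += f"\n  AI: {reply_snippet}"
--         if total + len(entry) > max_chars:
--             break
--         parts.append(entry)
--         total += len(entry)
--
--     if not parts:
--         return None
--     parts.reverse()
--     return "\n".join(parts)
-- ===== SOURCE B (Python) =====
-- from typing import List, Optional, Tuple
--
--
-- def _format_entry(user_content: str, assistant_reply: Optional[str]) -> str:
--     snippet = user_content.strip()
--     if len(snippet) > 400:
--         snippet = snippet[:400] + "…（省略）"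
--     entry = f"- ユーザー: {snippet}"
--     if assistant_reply:
--         reply = assistant_reply.strip()
--         if len(reply) > 200:
--             reply = reply[:200] + "…"
--         entry += f"\n  AI: {reply}"
--     return entry
--
--
-- def summarize_recent_context(
--     history: List[Tuple[str, Optional[str]]],
--     max_chars: int = 1500,
-- ) -> Optional[str]:
--     entries = [_format_entry(u, a) for u, a in reversed(history)]
--     totals = []
--     t = 0
--     for e in entries:
--         t += len(e)
--         totals.append(t)
--     k = sum(1 for s in totals if s <= max_chars)
--     kept = entries[:k]
--     if not kept:
--         return None
--     return "\n".join(reversed(kept))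
-- ===== Notes on version B (the rewrite author's own statement) =====
-- stated objective: alternative
-- what changed: Replaces A's interleaved format-and-accumulate loop with early break by a two-pass decomposition: format all entries of reversed(history), compute prefix sums of their lengths, keep the prefix whose running totals stay <= max_chars (a count over the monotone prefix sums), then reverse and join.
import Mathlib
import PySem

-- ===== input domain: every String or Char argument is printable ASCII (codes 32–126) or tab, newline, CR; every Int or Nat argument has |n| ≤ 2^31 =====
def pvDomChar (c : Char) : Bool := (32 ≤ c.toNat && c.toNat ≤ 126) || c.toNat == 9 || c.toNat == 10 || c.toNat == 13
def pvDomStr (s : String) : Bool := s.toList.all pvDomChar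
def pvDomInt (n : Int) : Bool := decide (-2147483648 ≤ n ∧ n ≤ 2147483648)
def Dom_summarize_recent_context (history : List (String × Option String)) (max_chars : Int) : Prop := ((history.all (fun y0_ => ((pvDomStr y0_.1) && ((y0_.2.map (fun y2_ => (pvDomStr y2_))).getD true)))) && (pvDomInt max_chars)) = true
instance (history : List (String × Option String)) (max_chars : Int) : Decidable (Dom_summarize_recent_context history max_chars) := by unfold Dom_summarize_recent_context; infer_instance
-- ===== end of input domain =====

-- B changes the decomposition: format all entries first, then select the fitting prefix by
-- a prefix-sum count (alternative structure, same cost); equivalence of return values proved below.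

-- ===== PORT A =====
-- A's loop over reversed(history): formats each entry inline, breaks when total would exceed max_chars.
def pvLoopA (max_chars : Int) : List (String × Option String) → List String → Int → List String
  | [], parts, _ => parts
  | (user_content, assistant_reply) :: rest, parts, total =>
    let snippet := PySem.Str.strip user_content
    let snippet := if PySem.Str.len snippet > 400 then PySem.Str.slice snippet none (some 400) ++ "…（省略）" else snippet
    let entry := "- ユーザー: " ++ snippet
    let entry :=
      match assistant_reply with
      | none => entry
      | some ar =>
        if ar == "" then entry
        else
          let reply_snippet := PySem.Str.strip ar
          let reply_snippet := if PySem.Str.len reply_snippet > 200 then PySem.Str.slice reply_snippet none (some 200) ++ "…" else reply_snippet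
          entry ++ "\n  AI: " ++ reply_snippet
    if total + PySem.Str.len entry > max_chars then parts
    else pvLoopA max_chars rest (parts ++ [entry]) (total + PySem.Str.len entry)

def summarize_recent_context (history : List (String × Option String)) (max_chars : Int) : Option String :=
  if history.isEmpty then none
  else
    let parts := pvLoopA max_chars history.reverse [] 0
    if parts.isEmpty then none
    else some (PySem.Str.join "\n" parts.reverse)

-- ===== PORT B =====
-- B's helper: format one entry (user line, optional AI line, with the same truncations).
def pvFmtEntry (user_content : String) (assistant_reply : Option String) : String :=
  let snippet := PySem.Str.strip user_content
  let snippet := if PySem.Str.len snippet > 400 then PySem.Str.slice snippet none (some 400) ++ "…（省略）" else snippet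
  let entry := "- ユーザー: " ++ snippet
  match assistant_reply with
  | none => entry
  | some ar =>
    if ar == "" then entry
    else
      let reply_snippet := PySem.Str.strip ar
      let reply_snippet := if PySem.Str.len reply_snippet > 200 then PySem.Str.slice reply_snippet none (some 200) ++ "…" else reply_snippet
      entry ++ "\n  AI: " ++ reply_snippet

def summarize_recent_context_alt (history : List (String × Option String)) (max_chars : Int) : Option String :=
  let entries := history.reverse.map (fun p => pvFmtEntry p.1 p.2)
  let totals := (entries.foldl (fun (acc : List Int × Int) e =>
      let t := acc.2 + PySem.Str.len e
      (acc.1 ++ [t], t)) ([], 0)).1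
  let k := (totals.filter (fun s => decide (s ≤ max_chars))).length
  let kept := entries.take k
  if kept.isEmpty then none
  else some (PySem.Str.join "\n" kept.reverse)

-- ===== PRECONDITION & SPEC =====
def Spec_summarize_recent_context (history : List (String × Option String)) (max_chars : Int) (out : Option String) : Prop := out = summarize_recent_context_alt history max_chars
instance (history : List (String × Option String)) (max_chars : Int) (out : Option String) : Decidable (Spec_summarize_recent_context history max_chars out) := by unfold Spec_summarize_recent_context; infer_instance

-- ===== CLAIM (what is proved, stated in full; the proofs are below) =====
def Claim_equal_summarize_recent_context : Prop := ∀ (history : List (String × Option String)) (max_chars : Int), Dom_summarize_recent_context history max_chars → Spec_summarize_recent_context history max_chars (summarize_recent_context history max_chars)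

-- ===== LEMMAS AND PROOFS =====

-- prefix sums of entry lengths starting at t
def pvPsums : List String → Int → List Int
  | [], _ => []
  | e :: es, t => (t + PySem.Str.len e) :: pvPsums es (t + PySem.Str.len e)

theorem pvPsums_lb : ∀ (es : List String) (t x : Int), x ∈ pvPsums es t → t ≤ x := by
  intro es
  induction es with
  | nil => intro t x h; simp [pvPsums] at h
  | cons e es ih =>
    intro t x h
    have hlen : 0 ≤ PySem.Str.len e := by
      simp [PySem.Str.len_eq]
    simp [pvPsums] at h
    rcases h with h | h
    · omega
    · have := ih (t + PySem.Str.len e) x h; omega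

theorem pvFoldl_eq_psums : ∀ (es : List String) (acc : List Int) (t : Int),
    (es.foldl (fun (acc : List Int × Int) e =>
      let s := acc.2 + PySem.Str.len e
      (acc.1 ++ [s], s)) (acc, t)).1 = acc ++ pvPsums es t := by
  intro es
  induction es with
  | nil => intro acc t; simp [pvPsums]
  | cons e es ih =>
    intro acc t
    simp only [List.foldl_cons, pvPsums]
    rw [ih]
    simp

theorem pvLoopA_eq : ∀ (mc : Int) (l : List (String × Option String)) (parts : List String) (t : Int),
    pvLoopA mc l parts t =
      parts ++ (l.map (fun p => pvFmtEntry p.1 p.2)).take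
        (((pvPsums (l.map (fun p => pvFmtEntry p.1 p.2)) t).filter (fun s => decide (s ≤ mc))).length) := by
  intro mc l
  induction l with
  | nil => intro parts t; simp [pvLoopA, pvPsums]
  | cons p l ih =>
    intro parts t
    obtain ⟨u, r⟩ := p
    rw [pvLoopA.eq_def]
    simp only [List.map_cons, pvPsums]
    set e := pvFmtEntry u r with he
    simp only [pvFmtEntry] at he
    by_cases hgt : t + PySem.Str.len e > mc
    · rw [if_pos (by rw [← he]; exact hgt)]
      have hfilter : (pvPsums (l.map (fun p => pvFmtEntry p.1 p.2)) (t + PySem.Str.len e)).filter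
          (fun s => decide (s ≤ mc)) = [] := by
        apply List.filter_eq_nil_iff.mpr
        intro x hx
        have := pvPsums_lb _ _ _ hx
        simp; omega
      rw [List.filter_cons_of_neg (by simp [PySem.Str.len_eq] at hgt ⊢; omega), hfilter]
      simp
    · rw [if_neg (by rw [← he]; exact hgt)]
      rw [← he, ih]
      rw [List.filter_cons_of_pos (by simp [PySem.Str.len_eq] at hgt ⊢; omega)]
      simp

-- ===== VERDICT (by name: the statement is the Claim_ definition above) =====
theorem summarize_recent_context_spec : Claim_equal_summarize_recent_context := by
  unfold Claim_equal_summarize_recent_context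
  intro history max_chars _
  unfold Spec_summarize_recent_context
  unfold summarize_recent_context summarize_recent_context_alt
  simp only [pvFoldl_eq_psums, pvLoopA_eq, List.nil_append]
  cases history with
  | nil => simp
  | cons h t => simp
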